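-- pv_equiv track=rewrite | github.com/pypi-data/pypi-mirror-312 | packages/litedis/litedis-2.2.3.tar.gz/litedis-2.2.3/litedis/utils.py | find_list_index
-- ===== SOURCE A (Python) =====
-- from typing import Iterable, List, Tuple, Union, Callable, Any, Dict
--
-- def find_list_index(lst: List, item: Any, direction: str = "left"):
--     """
--     查找列表索引
--     :param lst: 列表
--     :param item: 要查找的元素
--     :param direction: 查找的方向，默认从左查找
--     :return:
--     """
--     if direction.lower() == "left":
--         for index in range(len(lst)):
--             if lst[index] == item:
--                 return index
--         return -1
--
--     else:
--         for index in range(len(lst) - 1, -1, -1):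
--             if lst[index] == item:
--                 return index
--         return -1
-- ===== SOURCE B (Python) =====
-- def find_list_index(lst, item, direction="left"):
--     left = direction.lower() == "left"
--     matches = [i for i, x in enumerate(lst) if x == item]
--     if left:
--         return matches[0] if matches else -1
--     else:
--         return matches[-1] if matches else -1
-- ===== Notes on version B (the rewrite author's own statement) =====
-- stated objective: idiomatic
-- what changed: Replaces the two mirrored short-circuit index loops (forward scan and separate reverse range scan) with one forward enumerate pass that collects all matching indices, then selects the first or last of them.
import Mathlib
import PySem

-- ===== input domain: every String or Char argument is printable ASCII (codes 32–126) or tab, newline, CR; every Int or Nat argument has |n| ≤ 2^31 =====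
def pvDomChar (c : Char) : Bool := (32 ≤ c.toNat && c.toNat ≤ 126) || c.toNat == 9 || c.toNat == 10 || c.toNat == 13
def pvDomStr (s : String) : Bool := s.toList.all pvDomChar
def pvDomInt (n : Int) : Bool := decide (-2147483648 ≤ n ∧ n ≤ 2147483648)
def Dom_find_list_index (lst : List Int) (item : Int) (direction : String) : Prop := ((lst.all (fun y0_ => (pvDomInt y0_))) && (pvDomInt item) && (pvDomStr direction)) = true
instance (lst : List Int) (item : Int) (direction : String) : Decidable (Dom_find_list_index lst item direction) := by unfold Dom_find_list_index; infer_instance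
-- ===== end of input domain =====

-- B replaces A's two mirrored short-circuit index loops with one enumerate pass that
-- collects all matching indices and selects the first or last (idiomatic; same cost).


-- ===== PORT A =====
-- A's loop body: scan a list of indices, return the first index i with lst[i] == item, else -1
-- (indices produced by A's ranges are always in bounds, so lst[i] is pyGetD with an arbitrary default)
def pvScanA (lst : List Int) (item : Int) : List Int → Int
  | [] => -1
  | i :: rest => if PySem.List.pyGetD lst i 0 = item then i else pvScanA lst item rest

def find_list_index (lst : List Int) (item : Int) (direction : String) : Int :=
  if PySem.Str.lower direction = "left" then
    pvScanA lst item (PySem.List.pyRange 0 (lst.length : Int) 1)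
  else
    pvScanA lst item (PySem.List.pyRange ((lst.length : Int) - 1) (-1) (-1))

-- ===== PORT B =====
def find_list_index_alt (lst : List Int) (item : Int) (direction : String) : Int :=
  let left := PySem.Str.lower direction = "left"
  let hits := ((PySem.List.enumerate lst 0).filter (fun p => p.2 = item)).map (·.1)
  if left then hits.head?.getD (-1)      -- matches[0] if matches else -1
  else hits.getLast?.getD (-1)           -- matches[-1] if matches else -1

-- ===== PRECONDITION & SPEC =====
def Spec_find_list_index (lst : List Int) (item : Int) (direction : String) (out : Int) : Prop := out = find_list_index_alt lst item direction
instance (lst : List Int) (item : Int) (direction : String) (out : Int) : Decidable (Spec_find_list_index lst item direction out) := by unfold Spec_find_list_index; infer_instance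

-- ===== CLAIM (what is proved, stated in full; the proofs are below) =====
def Claim_equal_find_list_index : Prop := ∀ (lst : List Int) (item : Int) (direction : String), Dom_find_list_index lst item direction → Spec_find_list_index lst item direction (find_list_index lst item direction)

-- ===== LEMMAS AND PROOFS =====

-- scanning a list of indices = scanning the corresponding (index, value) pairs
def pvFirstMatch (item : Int) : List (Int × Int) → Int
  | [] => -1
  | (i, x) :: rest => if x = item then i else pvFirstMatch item rest

theorem pvScanA_eq_firstMatch (lst : List Int) (item : Int) (idxs : List Int) :
    pvScanA lst item idxs
      = pvFirstMatch item (idxs.map (fun j => (j, PySem.List.pyGetD lst j 0))) := by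
  induction idxs with
  | nil => rfl
  | cons i rest ih => simp [pvScanA, pvFirstMatch, ih]

theorem pvFirstMatch_eq_filter (item : Int) (ps : List (Int × Int)) :
    pvFirstMatch item ps
      = ((ps.filter (fun p => p.2 = item)).map (·.1)).head?.getD (-1) := by
  induction ps with
  | nil => rfl
  | cons p rest ih =>
    obtain ⟨i, x⟩ := p
    by_cases h : x = item <;> simp [pvFirstMatch, h, ih]

theorem pvEnumMap (lst : List Int) :
    (PySem.List.pyRange 0 (lst.length : Int) 1).map (fun j => (j, PySem.List.pyGetD lst j 0))
      = PySem.List.enumerate lst 0 := by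
  have h := PySem.List.enumerate_eq_map_pyRange (xs := lst) (d := 0)
  rw [h, PySem.List.len_eq]

theorem find_list_index_spec_aux (lst : List Int) (item : Int) (direction : String) :
    find_list_index lst item direction = find_list_index_alt lst item direction := by
  unfold find_list_index find_list_index_alt
  by_cases h : PySem.Str.lower direction = "left"
  · rw [if_pos h, if_pos h, pvScanA_eq_firstMatch, pvEnumMap, pvFirstMatch_eq_filter]
  · rw [if_neg h, if_neg h, pvScanA_eq_firstMatch]
    have hrev : PySem.List.pyRange ((lst.length : Int) - 1) (-1) (-1)
        = (PySem.List.pyRange 0 (lst.length : Int) 1).reverse := by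
      rw [PySem.List.pyRange_neg_one_eq_reverse]; norm_num
    rw [hrev, List.map_reverse, pvEnumMap, pvFirstMatch_eq_filter,
        List.filter_reverse, List.map_reverse, List.head?_reverse]

-- ===== VERDICT (by name: the statement is the Claim_ definition above) =====
theorem find_list_index_spec : Claim_equal_find_list_index := by
  intro lst item direction _
  unfold Spec_find_list_index
  exact find_list_index_spec_aux lst item direction
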